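-- pv_equiv track=rewrite | github.com/moshe-kahn/listen-lab | backend/app/main.py | _album_track_name_map
-- ===== SOURCE A (Python) =====
-- from typing import Any
--
-- def _album_track_name_map(tracks: list[dict[str, Any]]) -> dict[str, list[str]]:
--     names_by_album: dict[str, list[str]] = {}
--     for track in tracks:
--         album_id = track.get("album_id")
--         track_name = track.get("track_name")
--         if not album_id or not track_name:
--             continue
--         album_names = names_by_album.setdefault(album_id, [])
--         if track_name not in album_names:
--             album_names.append(track_name)
--     return names_by_album
-- ===== SOURCE B (Python) =====
-- def _album_track_name_map(tracks):
--     # Pass 1: extract the valid (album_id, track_name) pairs once.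
--     pairs = []
--     for t in tracks:
--         a = t.get("album_id")
--         n = t.get("track_name")
--         if a and n:
--             pairs.append((a, n))
--     # Pass 2: albums in first-occurrence order; per album, dedup its names in order.
--     albums = list(dict.fromkeys(a for a, _ in pairs))
--     return {a: list(dict.fromkeys(n for x, n in pairs if x == a)) for a in albums}
-- ===== Notes on version B (the rewrite author's own statement) =====
-- stated objective: alternative
-- what changed: A builds the dict in one pass with an inline membership-checked append per track; B first extracts the valid (album_id, track_name) pairs, then groups per first-occurrence album by scanning the pair list and deduplicates each album's names with dict.fromkeys.
import Mathlib
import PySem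

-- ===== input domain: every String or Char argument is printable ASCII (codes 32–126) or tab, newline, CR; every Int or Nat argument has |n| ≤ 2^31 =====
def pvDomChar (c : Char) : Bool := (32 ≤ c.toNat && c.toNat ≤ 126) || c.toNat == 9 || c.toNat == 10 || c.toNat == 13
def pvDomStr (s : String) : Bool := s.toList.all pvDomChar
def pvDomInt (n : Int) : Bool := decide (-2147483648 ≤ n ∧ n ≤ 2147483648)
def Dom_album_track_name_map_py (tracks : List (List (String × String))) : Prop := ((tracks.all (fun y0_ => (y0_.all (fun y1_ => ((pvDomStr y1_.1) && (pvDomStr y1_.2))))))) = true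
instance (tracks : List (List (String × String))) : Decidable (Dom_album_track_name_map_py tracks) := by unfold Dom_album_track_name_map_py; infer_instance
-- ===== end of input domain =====

-- B splits A's single inline-dedup loop into a filter pass plus a per-album group-and-dedup pass (objective: alternative).

-- ===== PORT A =====
-- A's loop body: get both fields, skip falsy, setdefault + conditional append.
def pvStepA (d : PySem.Dict String (List String)) (track : List (String × String)) :
    PySem.Dict String (List String) :=
  match List.lookup "album_id" track, List.lookup "track_name" track with
  | some a, some n =>
      if a = "" ∨ n = "" then d
      else
        let cur := d.getD a []
        if n ∈ cur then d else d.insert a (cur ++ [n])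
  | _, _ => d

def album_track_name_map_py (tracks : List (List (String × String))) : List (String × List String) :=
  (tracks.foldl pvStepA PySem.Dict.empty).items

-- ===== PORT B =====
-- one track's valid (album_id, track_name) pair, if any
def pvValid (t : List (String × String)) : Option (String × String) :=
  match List.lookup "album_id" t, List.lookup "track_name" t with
  | some a, some n => if a ≠ "" ∧ n ≠ "" then some (a, n) else none
  | _, _ => none

-- valid (album_id, track_name) pairs, in order
def pvPairs (tracks : List (List (String × String))) : List (String × String) :=
  tracks.filterMap pvValid

def album_track_name_map_py_alt (tracks : List (List (String × String))) : List (String × List String) :=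
  let pairs := pvPairs tracks
  (PySem.List.dedup (pairs.map Prod.fst)).map (fun a =>
    (a, PySem.List.dedup ((pairs.filter (fun p => p.1 = a)).map Prod.snd)))

-- ===== PRECONDITION & SPEC =====
def Spec_album_track_name_map_py (tracks : List (List (String × String))) (out : List (String × List String)) : Prop := out = album_track_name_map_py_alt tracks
instance (tracks : List (List (String × String))) (out : List (String × List String)) : Decidable (Spec_album_track_name_map_py tracks out) := by unfold Spec_album_track_name_map_py; infer_instance

-- ===== CLAIM (what is proved, stated in full; the proofs are below) =====
def Claim_equal_album_track_name_map_py : Prop := ∀ (tracks : List (List (String × String))), Dom_album_track_name_map_py tracks → Spec_album_track_name_map_py tracks (album_track_name_map_py tracks)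

-- ===== LEMMAS AND PROOFS =====

-- B's shape, as a function of the pair list
def pvBuild (ps : List (String × String)) : List (String × List String) :=
  (PySem.List.dedup (ps.map Prod.fst)).map (fun a =>
    (a, PySem.List.dedup ((ps.filter (fun p => p.1 = a)).map Prod.snd)))

-- A's step on a valid pair
def pvStepP (d : PySem.Dict String (List String)) (p : String × String) :
    PySem.Dict String (List String) :=
  let cur := d.getD p.1 []
  if p.2 ∈ cur then d else d.insert p.1 (cur ++ [p.2])

theorem pvFoldA_eq_foldP (tracks : List (List (String × String))) (d : PySem.Dict String (List String)) :
    tracks.foldl pvStepA d = (pvPairs tracks).foldl pvStepP d := by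
  induction tracks generalizing d with
  | nil => rfl
  | cons t ts ih =>
    simp only [List.foldl_cons, pvPairs, List.filterMap_cons]
    rcases ha : List.lookup "album_id" t with _ | a <;>
      rcases hn : List.lookup "track_name" t with _ | n <;>
      simp only [pvStepA, pvValid, ha, hn] <;> try exact ih d
    by_cases h : a = "" ∨ n = ""
    · have h' : ¬ (a ≠ "" ∧ n ≠ "") := by tauto
      rw [if_pos h, if_neg h']
      exact ih d
    · have h' : a ≠ "" ∧ n ≠ "" := by tauto
      rw [if_neg h, if_pos h']
      simp only [List.foldl_cons]
      exact ih _

theorem pvDedup_append_singleton {α : Type} [DecidableEq α] (xs : List α) (x : α) :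
    PySem.List.dedup (xs ++ [x]) =
      if x ∈ xs then PySem.List.dedup xs else PySem.List.dedup xs ++ [x] := by
  have hfold : List.foldl PySem.Set.add [] xs = PySem.List.dedup xs := by
    rw [PySem.List.dedup_eq_ofList, PySem.Set.ofList_eq_foldl]
  have hmem : ((List.foldl PySem.Set.add ([] : PySem.Set α) xs).contains x = true) ↔ x ∈ xs := by
    rw [PySem.Set.contains_iff, hfold, PySem.List.mem_dedup]
  simp only [PySem.List.dedup_eq_ofList, PySem.Set.ofList_eq_foldl, List.foldl_append,
    List.foldl_cons, List.foldl_nil]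
  by_cases h : x ∈ xs
  · simp [PySem.Set.add, ← PySem.Set.ofList_eq_foldl]
  · simp [PySem.Set.add, ← PySem.Set.ofList_eq_foldl]

theorem pvKeys_build (ps : List (String × String)) (d : PySem.Dict String (List String))
    (h : d.items = pvBuild ps) : d.keys = PySem.List.dedup (ps.map Prod.fst) := by
  simp only [PySem.Dict.keys, h, pvBuild, List.map_map]
  simp [Function.comp_def]

theorem pvNodup_keys_build (ps : List (String × String)) (d : PySem.Dict String (List String))
    (h : d.items = pvBuild ps) : d.keys.Nodup := by
  rw [pvKeys_build ps d h]
  exact PySem.List.nodup_dedup _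

-- the invariant step: A's per-pair step preserves B's shape
theorem pvStep_build (ps : List (String × String)) (p : String × String)
    (d : PySem.Dict String (List String)) (h : d.items = pvBuild ps) :
    (pvStepP d p).items = pvBuild (ps ++ [p]) := by
  obtain ⟨a, n⟩ := p
  have hkeys := pvKeys_build ps d h
  have hnd := pvNodup_keys_build ps d h
  by_cases hmem : a ∈ ps.map Prod.fst
  · -- key a already present: its current value is the deduped name list of a in ps
    have hitem : (a, PySem.List.dedup ((ps.filter (fun p => p.1 = a)).map Prod.snd)) ∈ d.items := by
      rw [h]
      simp only [pvBuild, List.mem_map]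
      exact ⟨a, by rw [PySem.List.mem_dedup]; exact hmem, rfl⟩
    have hcur : d.getD a [] = PySem.List.dedup ((ps.filter (fun p => p.1 = a)).map Prod.snd) :=
      PySem.Dict.getD_of_mem_items d hitem hnd []
    have hfst : (ps ++ [(a, n)]).map Prod.fst = ps.map Prod.fst ++ [a] := by simp
    have hded : PySem.List.dedup ((ps ++ [(a, n)]).map Prod.fst) = PySem.List.dedup (ps.map Prod.fst) := by
      rw [hfst, pvDedup_append_singleton, if_pos hmem]
    by_cases hn : n ∈ d.getD a []
    · -- name already recorded: both sides unchanged
      simp only [pvStepP, hn, if_pos]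
      rw [h]
      simp only [pvBuild, hded]
      apply List.map_congr_left
      intro a' _
      congr 1
      rw [List.filter_append]
      by_cases hb : a' = a
      · subst hb
        simp only [List.filter_cons, List.filter_nil, decide_true, if_pos, List.map_append,
          List.map_cons, List.map_nil]
        rw [pvDedup_append_singleton]
        rw [if_pos]
        rw [hcur, PySem.List.mem_dedup] at hn
        simpa using hn
      · have : ¬ ((a, n).1 = a') := fun he => hb he.symm
        simp [this]
    · -- new name: A appends it; B's dedup gains it at the end
      simp only [pvStepP, hn, if_neg, not_false_iff]
      have hcont : d.contains a = true := by
        rw [PySem.Dict.contains_iff_mem_keys, hkeys, PySem.List.mem_dedup]; exact hmem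
      rw [PySem.Dict.items_insert_of_contains d _ hcont, h]
      simp only [pvBuild, hded, List.map_map]
      apply List.map_congr_left
      intro a' ha'
      rw [PySem.List.mem_dedup] at ha'
      by_cases hb : a' = a
      · subst hb
        simp only [Function.comp, beq_self_eq_true, if_pos]
        have : (ps ++ [(a', n)]).filter (fun p => p.1 = a') =
            ps.filter (fun p => p.1 = a') ++ [(a', n)] := by
          rw [List.filter_append]; simp
        have hnotin : n ∉ List.map Prod.snd (List.filter (fun p => decide (p.1 = a')) ps) := by
          rw [hcur, PySem.List.mem_dedup] at hn; simpa using hn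
        rw [this]
        simp only [List.map_append, List.map_cons, List.map_nil]
        rw [pvDedup_append_singleton, if_neg hnotin, hcur]
      · have hbeq : (a' == a) = false := by simp [hb]
        simp only [Function.comp, hbeq, if_neg, Bool.false_eq_true, not_false_iff]
        congr 2
        rw [List.filter_append]
        have : ¬ ((a, n).1 = a') := fun he => hb he.symm
        simp [this]
  · -- new key: A appends (a, [n]); B's album list gains a at the end
    have hcont : d.contains a = false := by
      rw [← Bool.not_eq_true, PySem.Dict.contains_iff_mem_keys, hkeys, PySem.List.mem_dedup]
      exact hmem
    have hcur : d.getD a [] = [] := PySem.Dict.getD_of_not_contains d [] hcont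
    have hn : ¬ n ∈ d.getD a [] := by rw [hcur]; simp
    simp only [pvStepP, hn, if_neg, not_false_iff]
    rw [PySem.Dict.items_insert_of_not_contains d _ hcont, h, hcur]
    have hfst : (ps ++ [(a, n)]).map Prod.fst = ps.map Prod.fst ++ [a] := by simp
    simp only [pvBuild, hfst, pvDedup_append_singleton, hmem, if_neg, not_false_iff,
      List.map_append, List.map_cons, List.map_nil]
    congr 1
    · apply List.map_congr_left
      intro a' ha'
      rw [PySem.List.mem_dedup] at ha'
      congr 2
      rw [List.filter_append]
      have hb : a' ≠ a := fun he => hmem (he ▸ ha')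
      have : ¬ ((a, n).1 = a') := fun he => hb he.symm
      simp [this]
    · have : (ps ++ [(a, n)]).filter (fun p => p.1 = a) = [(a, n)] := by
        rw [List.filter_append]
        have h1 : ps.filter (fun p => p.1 = a) = [] := by
          rw [List.filter_eq_nil_iff]
          intro p hp hpa
          exact hmem (List.mem_map.mpr ⟨p, hp, by simpa using hpa⟩)
        simp [h1]
      simp [this, PySem.List.dedup_eq_ofList, PySem.Set.ofList_eq_foldl, PySem.Set.add,
        PySem.Set.contains]

theorem pvFoldP_build (ps : List (String × String)) :
    ((ps.foldl pvStepP PySem.Dict.empty).items) = pvBuild ps := by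
  induction ps using List.reverseRecOn with
  | nil => rfl
  | append_singleton ps p ih =>
    rw [List.foldl_append, List.foldl_cons, List.foldl_nil]
    exact pvStep_build ps p _ ih

-- ===== VERDICT (by name: the statement is the Claim_ definition above) =====
theorem album_track_name_map_py_spec : Claim_equal_album_track_name_map_py := by
  intro tracks _
  show album_track_name_map_py tracks = album_track_name_map_py_alt tracks
  rw [album_track_name_map_py, pvFoldA_eq_foldP, pvFoldP_build]
  rfl
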